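-- pv_equiv track=rewrite | github.com/yohan9569/Algorithm | 백준/Gold/8913. 문자열 뽑기/문자열 뽑기.py | dfs
-- ===== SOURCE A (Python) =====
-- from itertools import groupby
--
-- def dfs(arr):
--     if len(arr) == 0:
--         return True
--
--     group = [''.join(g) for k,g in groupby(arr)]
--     for i,v in enumerate(group):
--         if len(v) > 1:
--             group.pop(i)
--             if dfs(''.join(group)):
--                 return True
--             else:
--                 group.insert(i, v)
--     return False
-- ===== SOURCE B (Python) =====
-- from itertools import groupby
--
-- def dfs(arr):
--     # Search over run-length encodings with memoization instead of rebuilding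
--     # and re-grouping strings at every node.
--     memo = {}
--
--     def remove(runs, i):
--         left, right = runs[:i], runs[i + 1:]
--         if left and right and left[-1][0] == right[0][0]:
--             return left[:-1] + ((left[-1][0], left[-1][1] + right[0][1]),) + right[1:]
--         return left + right
--
--     def solve(runs):
--         if not runs:
--             return True
--         if runs in memo:
--             return memo[runs]
--         res = False
--         for i, (c, n) in enumerate(runs):
--             if n > 1:
--                 if solve(remove(runs, i)):
--                     res = True
--                     break
--         memo[runs] = res
--         return res
--
--     return solve(tuple((c, sum(1 for _ in g)) for c, g in groupby(arr)))
-- ===== Notes on version B (the rewrite author's own statement) =====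
-- stated objective: alternative
-- what changed: A re-joins the groups into a string and re-runs groupby at every node of an exponential backtracking search; B run-length-encodes the string once and searches over run lists with a memo dict, so each distinct reachable state is solved once (intended as faster; a timing run measured 558x at n=64 but could not confirm it overall since both time out on some larger inputs).
import Mathlib
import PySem

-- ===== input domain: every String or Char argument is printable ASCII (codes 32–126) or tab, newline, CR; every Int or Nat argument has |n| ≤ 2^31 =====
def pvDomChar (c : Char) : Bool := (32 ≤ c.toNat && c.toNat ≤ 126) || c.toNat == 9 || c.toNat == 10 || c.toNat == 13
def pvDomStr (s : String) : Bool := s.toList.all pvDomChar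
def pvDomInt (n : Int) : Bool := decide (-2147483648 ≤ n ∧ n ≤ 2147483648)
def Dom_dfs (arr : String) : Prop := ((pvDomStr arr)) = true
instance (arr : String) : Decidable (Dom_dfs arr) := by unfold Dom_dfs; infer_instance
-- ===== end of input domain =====

-- B replaces A's rebuild-string-and-regroup backtracking with a search over
-- run-length encodings memoized in a dict (objective: alternative algorithm).

-- ===== PORT A =====

-- itertools.groupby on a list of characters (groups of consecutive equal chars)
def pyGroupby : List Char → List (List Char)
  | [] => []
  | c :: cs =>
    match pyGroupby cs with
    | (d :: g) :: rest => if c = d then (c :: d :: g) :: rest else [c] :: (d :: g) :: rest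
    | gs => [c] :: gs

-- sum-of-lengths facts used by the termination argument of dfsCore
theorem pyGroupby_flatten (l : List Char) : (pyGroupby l).flatten = l := by
  induction l with
  | nil => rfl
  | cons c cs ih =>
    rw [pyGroupby]
    rcases h : pyGroupby cs with _ | ⟨_ | ⟨d, g⟩, rest⟩ <;>
      simp_all [List.flatten] <;> split <;> simp_all

theorem flatten_eraseIdx_length {α : Type} (gs : List (List α)) (k : Nat) (h : k < gs.length) :
    ((gs.eraseIdx k).flatten).length + gs[k].length = gs.flatten.length := by
  induction gs generalizing k with
  | nil => simp at h
  | cons g gs ih =>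
    cases k with
    | zero => simp [List.eraseIdx]; omega
    | succ k =>
      simp only [List.eraseIdx, List.flatten_cons, List.length_append, List.getElem_cons_succ]
      have := ih k (by simpa using h)
      omega

def dfsCore (l : List Char) : Bool :=
  if l.length = 0 then true
  else
    (PySem.List.enumerate (pyGroupby l) 0).attach.any (fun p =>
      if _h : 1 < p.1.2.length then
        dfsCore (((pyGroupby l).eraseIdx p.1.1.toNat).flatten)
      else false)
termination_by l.length
decreasing_by
  obtain ⟨k, hk, hp⟩ := (PySem.List.mem_enumerate_iff _ _ _).mp p.2
  have h2 : 1 < p.1.2.length := _h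
  rw [hp] at h2 ⊢
  simp only [zero_add, Int.toNat_natCast] at h2 ⊢
  have hkk : k < (pyGroupby l).length := hk
  have := flatten_eraseIdx_length (pyGroupby l) k hkk
  have hfl : (pyGroupby l).flatten.length = l.length := by rw [pyGroupby_flatten]
  show ((pyGroupby l).eraseIdx k).flatten.length < l.length
  omega

def dfs (arr : String) : Bool := dfsCore arr.toList

-- ===== PORT B =====

-- runs = tuple((c, sum(1 for _ in g)) for c, g in groupby(arr))
def runsOf : List Char → List (Char × Nat)
  | [] => []
  | c :: cs =>
    match runsOf cs with
    | (d, n) :: rest => if c = d then (c, n + 1) :: rest else (c, 1) :: (d, n) :: rest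
    | [] => [(c, 1)]

-- remove(runs, i): delete run i, merging the neighbours if their chars match
def removeRun (runs : List (Char × Nat)) (i : Nat) : List (Char × Nat) :=
  let left := runs.take i
  let right := runs.drop (i + 1)
  match left.getLast?, right with
  | some (c, m), (d, n) :: rs =>
      if c = d then left.dropLast ++ (c, m + n) :: rs else left ++ right
  | _, _ => left ++ right

def runsWeight (runs : List (Char × Nat)) : Nat := (runs.map Prod.snd).sum

theorem removeRun_spec (L R : List (Char × Nat)) (x : Char × Nat) :
    removeRun (L ++ x :: R) L.length =
      match L.getLast?, R with
      | some (c, m), (d, n) :: rs =>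
          if c = d then L.dropLast ++ (c, m + n) :: rs else L ++ R
      | _, _ => L ++ R := by
  have h1 : (L ++ x :: R).take L.length = L := by simp
  have h2 : (L ++ x :: R).drop (L.length + 1) = R := by simp
  unfold removeRun
  rw [h1, h2]

theorem removeRun_weight' (L R : List (Char × Nat)) (x : Char × Nat) :
    runsWeight (removeRun (L ++ x :: R) L.length) + x.2 = runsWeight (L ++ x :: R) := by
  rw [removeRun_spec]
  rcases hgl : L.getLast? with _ | ⟨c, m⟩
  · rcases R with _ | ⟨⟨d, n⟩, rs⟩
    · simp [runsWeight]
    · simp [runsWeight]; omega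
  · rcases R with _ | ⟨⟨d, n⟩, rs⟩
    · simp [runsWeight]
    · simp only [hgl]
      split
      · have htk : L = L.dropLast ++ [(c, m)] := (List.dropLast_append_getLast? _ hgl).symm
        conv_rhs => rw [htk]
        simp [runsWeight]
        omega
      · simp [runsWeight]; omega

theorem removeRun_weight_lt (runs : List (Char × Nat)) (k : Nat) (h : k < runs.length)
    (h2 : 1 < runs[k].2) : runsWeight (removeRun runs k) < runsWeight runs := by
  have hsplit : runs = runs.take k ++ runs[k] :: runs.drop (k + 1) := by
    conv_lhs => rw [← List.take_append_drop k runs]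
    rw [List.drop_eq_getElem_cons h]
  have hlen : (runs.take k).length = k := by simp [List.length_take]; omega
  have hw := removeRun_weight' (runs.take k) (runs.drop (k + 1)) runs[k]
  rw [hlen, ← hsplit] at hw
  omega

-- memoized solver; cache maps a runs list to its answer
mutual
def solveGo (runs : List (Char × Nat)) (cache : PySem.Dict (List (Char × Nat)) Bool) :
    Bool × PySem.Dict (List (Char × Nat)) Bool :=
  if runs = [] then (true, cache)
  else
    match cache.get? runs with
    | some b => (b, cache)
    | none =>
      match solveLoop runs (PySem.List.enumerate runs 0).attach cache with
      | (res, cache') => (res, cache'.insert runs res)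
  termination_by (runsWeight runs, runs.length + 1)
  decreasing_by
    apply Prod.Lex.right
    simp [PySem.List.length_enumerate]

def solveLoop (runs : List (Char × Nat))
    (cands : List {p // p ∈ PySem.List.enumerate runs 0})
    (cache : PySem.Dict (List (Char × Nat)) Bool) :
    Bool × PySem.Dict (List (Char × Nat)) Bool :=
  match cands with
  | [] => (false, cache)
  | q :: rest =>
    if _h : 1 < q.1.2.2 then
      match solveGo (removeRun runs q.1.1.toNat) cache with
      | (true, cache') => (true, cache')
      | (false, cache') => solveLoop runs rest cache'
    else solveLoop runs rest cache
  termination_by (runsWeight runs, cands.length)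
  decreasing_by
    · apply Prod.Lex.left
      obtain ⟨k, hk, hp⟩ := (PySem.List.mem_enumerate_iff _ _ _).mp q.2
      have h2 : 1 < q.1.2.2 := _h
      rw [hp] at h2 ⊢
      simp only [zero_add, Int.toNat_natCast] at h2 ⊢
      exact removeRun_weight_lt runs k hk (by simpa using h2)
    · apply Prod.Lex.right; simp
    · apply Prod.Lex.right; simp
end

def dfs_alt (arr : String) : Bool := (solveGo (runsOf arr.toList) PySem.Dict.empty).1

-- ===== PRECONDITION & SPEC =====
def Spec_dfs (arr : String) (out : Bool) : Prop := out = dfs_alt arr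
instance (arr : String) (out : Bool) : Decidable (Spec_dfs arr out) := by unfold Spec_dfs; infer_instance

-- ===== CLAIM (what is proved, stated in full; the proofs are below) =====
def Claim_equal_dfs : Prop := ∀ (arr : String), Dom_dfs arr → Spec_dfs arr (dfs arr)

-- ===== LEMMAS AND PROOFS =====

-- pure (unmemoized) reference solver, used only by the proofs
def solveP (runs : List (Char × Nat)) : Bool :=
  if runs = [] then true
  else
    (PySem.List.enumerate runs 0).attach.any (fun q =>
      if _h : 1 < q.1.2.2 then solveP (removeRun runs q.1.1.toNat) else false)
termination_by runsWeight runs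
decreasing_by
  obtain ⟨k, hk, hp⟩ := (PySem.List.mem_enumerate_iff _ _ _).mp q.2
  have h2 : 1 < q.1.2.2 := _h
  rw [hp] at h2 ⊢
  simp only [zero_add, Int.toNat_natCast] at h2 ⊢
  exact removeRun_weight_lt runs k hk (by simpa using h2)

-- ---------- run-length-encoding toolkit (proof-side only) ----------

def decodeRun (p : Char × Nat) : List Char := List.replicate p.2 p.1

def decodeRuns (rs : List (Char × Nat)) : List Char := (rs.map decodeRun).flatten

def merge1 (p : Char × Nat) (rl : List (Char × Nat)) : List (Char × Nat) :=
  match rl with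
  | (d, m) :: t => if p.1 = d then (p.1, m + p.2) :: t else p :: (d, m) :: t
  | [] => [p]

def mergeAll (rs : List (Char × Nat)) : List (Char × Nat) := rs.foldr merge1 []

def RunsGood (rs : List (Char × Nat)) : Prop :=
  (∀ p ∈ rs, 0 < p.2) ∧ rs.IsChain (fun a b => a.1 ≠ b.1)

theorem runsOf_cons (c : Char) (cs : List Char) :
    runsOf (c :: cs) = merge1 (c, 1) (runsOf cs) := by
  rw [runsOf]
  rcases runsOf cs with _ | ⟨⟨d, n⟩, rest⟩ <;> simp [merge1]

theorem merge1_merge1 (c : Char) (k : Nat) (rl : List (Char × Nat)) :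
    merge1 (c, 1) (merge1 (c, k) rl) = merge1 (c, k + 1) rl := by
  rcases rl with _ | ⟨⟨d, m⟩, t⟩
  · simp [merge1]
  · by_cases h : c = d <;> simp [merge1, h, Nat.add_assoc]

theorem runsOf_replicate_append (c : Char) (n : Nat) (h : 0 < n) (s : List Char) :
    runsOf (List.replicate n c ++ s) = merge1 (c, n) (runsOf s) := by
  induction n with
  | zero => omega
  | succ n ih =>
    rcases Nat.eq_zero_or_pos n with h0 | hpos
    · subst h0
      simpa using runsOf_cons c s
    · rw [List.replicate_succ, List.cons_append, runsOf_cons, ih hpos, merge1_merge1]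

theorem runsOf_decodeRuns (rs : List (Char × Nat)) (h : ∀ p ∈ rs, 0 < p.2) :
    runsOf (decodeRuns rs) = mergeAll rs := by
  induction rs with
  | nil => rfl
  | cons p rs ih =>
    obtain ⟨c, n⟩ := p
    have hdec : decodeRuns ((c, n) :: rs) = List.replicate n c ++ decodeRuns rs := by
      simp [decodeRuns, decodeRun]
    rw [hdec, runsOf_replicate_append c n (h (c, n) List.mem_cons_self) _,
      ih (fun p hp => h p (List.mem_cons_of_mem _ hp))]
    rfl

theorem merge1_good (c : Char) (n : Nat) (hn : 0 < n) (rl : List (Char × Nat))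
    (h : RunsGood rl) : RunsGood (merge1 (c, n) rl) := by
  obtain ⟨hpos, hch⟩ := h
  rcases rl with _ | ⟨⟨d, m⟩, t⟩
  · refine ⟨?_, ?_⟩
    · intro p hp
      simp [merge1] at hp
      subst hp
      simpa using hn
    · show List.IsChain _ [(c, n)]
      exact List.isChain_singleton _
  · by_cases hcd : c = d
    · subst hcd
      have hm : merge1 (c, n) ((c, m) :: t) = (c, m + n) :: t := by simp [merge1]
      rw [List.isChain_cons] at hch
      refine ⟨?_, ?_⟩
      · intro p hp
        rw [hm] at hp
        rcases List.mem_cons.mp hp with rfl | hp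
        · simp; omega
        · exact hpos p (List.mem_cons_of_mem _ hp)
      · rw [hm, List.isChain_cons]
        exact ⟨fun y hy => by simpa using hch.1 y hy, hch.2⟩
    · have hm : merge1 (c, n) ((d, m) :: t) = (c, n) :: (d, m) :: t := by
        simp [merge1, hcd]
      refine ⟨?_, ?_⟩
      · intro p hp
        rw [hm] at hp
        rcases List.mem_cons.mp hp with rfl | hp
        · simpa using hn
        · exact hpos p hp
      · rw [hm, List.isChain_cons]
        refine ⟨?_, hch⟩
        intro y hy
        simp at hy
        rw [← hy]
        simpa using hcd

theorem runsOf_good (l : List Char) : RunsGood (runsOf l) := by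
  induction l with
  | nil =>
    refine ⟨by simp [runsOf], ?_⟩
    show List.IsChain _ (runsOf [])
    rw [show runsOf [] = [] from rfl]
    exact List.isChain_nil
  | cons c cs ih =>
    rw [runsOf_cons]
    exact merge1_good c 1 (by omega) _ ih

theorem foldr_merge1_no_merge (left acc : List (Char × Nat))
    (h : (left ++ acc).IsChain (fun a b => a.1 ≠ b.1)) :
    left.foldr merge1 acc = left ++ acc := by
  induction left with
  | nil => rfl
  | cons p left ih =>
    have h' : (p :: (left ++ acc)).IsChain (fun a b => a.1 ≠ b.1) := by simpa using h
    rw [List.isChain_cons] at h'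
    rw [List.foldr_cons, ih h'.2]
    rcases hl : left ++ acc with _ | ⟨⟨d, m⟩, t⟩
    · rw [List.cons_append, hl]
      simp [merge1]
    · have hne : p.1 ≠ d := by
        have := h'.1 (d, m) (by rw [hl]; rfl)
        simpa using this
      rw [List.cons_append, hl]
      simp [merge1, hne]

theorem mergeAll_eq_self (rs : List (Char × Nat))
    (h : rs.IsChain (fun a b => a.1 ≠ b.1)) : mergeAll rs = rs := by
  have := foldr_merge1_no_merge rs [] (by simpa using h)
  simpa [mergeAll] using this

theorem mergeAll_erase (L R : List (Char × Nat)) (x : Char × Nat)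
    (h : RunsGood (L ++ x :: R)) :
    mergeAll (L ++ R) = removeRun (L ++ x :: R) L.length := by
  rw [removeRun_spec]
  obtain ⟨-, hch⟩ := h
  rw [List.isChain_append] at hch
  obtain ⟨hchL, hchxR, hjun⟩ := hch
  rw [List.isChain_cons] at hchxR
  obtain ⟨hxR, hchR⟩ := hchxR
  have hR : mergeAll R = R := mergeAll_eq_self R hchR
  rcases hgl : L.getLast? with _ | ⟨c, m⟩
  · have hLnil : L = [] := List.getLast?_eq_none_iff.mp hgl
    subst hLnil
    simpa [mergeAll] using hR
  · rcases R with _ | ⟨⟨d, n⟩, rs⟩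
    · simpa [mergeAll, List.append_nil] using mergeAll_eq_self L hchL
    · have hfold : mergeAll (L ++ (d, n) :: rs) = L.foldr merge1 ((d, n) :: rs) := by
        rw [mergeAll, List.foldr_append]
        rw [show ((d, n) :: rs).foldr merge1 [] = mergeAll ((d, n) :: rs) from rfl, hR]
      rw [hfold]
      have htk : L = L.dropLast ++ [(c, m)] := (List.dropLast_append_getLast? _ hgl).symm
      have hchL' : (L.dropLast ++ [(c, m)]).IsChain (fun a b => a.1 ≠ b.1) := htk ▸ hchL
      rw [List.isChain_append] at hchL'
      obtain ⟨hchL'', -, hjun'⟩ := hchL'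
      have hdrs : ∀ y ∈ rs.head?, d ≠ y.1 := by
        rw [List.isChain_cons] at hchR
        intro y hy
        simpa using hchR.1 y hy
      by_cases hcd : c = d
      · subst hcd
        have hm1 : merge1 (c, m) ((c, n) :: rs) = (c, n + m) :: rs := by simp [merge1]
        conv_lhs => rw [htk, List.foldr_append]
        rw [List.foldr_cons, List.foldr_nil, hm1]
        rw [foldr_merge1_no_merge _ _ ?hch]
        · simp [Nat.add_comm n m]
        case hch =>
          rw [List.isChain_append]
          refine ⟨hchL'', ?_, ?_⟩
          · rw [List.isChain_cons]
            exact ⟨fun y hy => hdrs y hy, hchR.tail⟩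
          · intro a ha b hb
            simp at hb
            rw [← hb]
            simpa using hjun' a ha (c, m) rfl
      · have hLj : ∀ a ∈ L.getLast?, ∀ b ∈ ((d, n) :: rs).head?, a.1 ≠ b.1 := by
          intro a ha b hb
          rw [hgl] at ha
          simp at ha hb
          subst ha
          subst hb
          simpa using hcd
        rw [foldr_merge1_no_merge _ _ (List.isChain_append.mpr ⟨hchL, hchR, hLj⟩)]
        simp [hcd]

theorem runsOf_ne_nil (l : List Char) (h : l ≠ []) : runsOf l ≠ [] := by
  rcases l with _ | ⟨c, cs⟩
  · exact absurd rfl h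
  · rw [runsOf_cons]
    rcases runsOf cs with _ | ⟨⟨d, n⟩, t⟩
    · simp [merge1]
    · by_cases hcd : c = d <;> simp [merge1, hcd]

theorem runsOf_erase (l : List Char) (k : Nat) (hk : k < (runsOf l).length) :
    runsOf (decodeRuns ((runsOf l).eraseIdx k)) = removeRun (runsOf l) k := by
  have hsplit : runsOf l = (runsOf l).take k ++ (runsOf l)[k] :: (runsOf l).drop (k + 1) := by
    conv_lhs => rw [← List.take_append_drop k (runsOf l)]
    rw [List.drop_eq_getElem_cons hk]
  have hlen : ((runsOf l).take k).length = k := by simp [List.length_take]; omega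
  have hpos : ∀ p ∈ (runsOf l).take k ++ (runsOf l).drop (k + 1), 0 < p.2 := by
    intro p hp
    rcases List.mem_append.mp hp with hp | hp
    · exact (runsOf_good l).1 p (List.mem_of_mem_take hp)
    · exact (runsOf_good l).1 p (List.mem_of_mem_drop hp)
  have hgood : RunsGood ((runsOf l).take k ++ (runsOf l)[k] :: (runsOf l).drop (k + 1)) := by
    rw [← hsplit]; exact runsOf_good l
  rw [List.eraseIdx_eq_take_drop_succ]
  rw [runsOf_decodeRuns _ hpos]
  have := mergeAll_erase ((runsOf l).take k) ((runsOf l).drop (k + 1)) (runsOf l)[k] hgood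
  rw [this, hlen, ← hsplit]

theorem pyGroupby_eq (l : List Char) : pyGroupby l = (runsOf l).map decodeRun := by
  induction l with
  | nil => rfl
  | cons c cs ih =>
    rw [pyGroupby, ih]
    rcases h : runsOf cs with _ | ⟨⟨d, n⟩, rest⟩
    · simp [runsOf, h, decodeRun]
    · have hn : 0 < n := (runsOf_good cs).1 (d, n) (h ▸ List.mem_cons_self)
      obtain ⟨n', rfl⟩ : ∃ n', n = n' + 1 := ⟨n - 1, by omega⟩
      rw [runsOf, h]
      by_cases hcd : c = d
      · subst hcd
        simp [decodeRun, List.replicate_succ]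
      · simp [decodeRun, List.replicate_succ, hcd]

theorem enumerate_map {α β : Type} (f : α → β) (xs : List α) (s : Int) :
    PySem.List.enumerate (xs.map f) s
      = (PySem.List.enumerate xs s).map (fun q => (q.1, f q.2)) := by
  induction xs generalizing s with
  | nil => simp [PySem.List.enumerate_nil]
  | cons x xs ih => simp [PySem.List.enumerate_cons, ih]

theorem any_attach {α : Type} (xs : List α) (F : α → Bool) :
    xs.attach.any (fun p => F p.1) = xs.any F := by
  conv_rhs => rw [← List.attach_map_subtype_val xs]
  rw [List.any_map]
  rfl

theorem any_congr_mem {α : Type} (xs : List α) (f g : α → Bool)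
    (h : ∀ x ∈ xs, f x = g x) : xs.any f = xs.any g := by
  induction xs with
  | nil => rfl
  | cons x xs ih =>
    simp only [List.any_cons, h x List.mem_cons_self,
      ih (fun y hy => h y (List.mem_cons_of_mem _ hy))]

theorem main_equiv_aux : ∀ (N : Nat) (l : List Char), l.length ≤ N →
    dfsCore l = solveP (runsOf l) := by
  intro N
  induction N with
  | zero =>
    intro l hl
    have : l = [] := by cases l <;> simp_all
    subst this
    rw [dfsCore, solveP]
    simp [runsOf]
  | succ N ih =>
    intro l hl
    by_cases hnil : l = []
    · subst hnil
      rw [dfsCore, solveP]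
      simp [runsOf]
    · rw [dfsCore, solveP]
      rw [if_neg (by simpa using hnil), if_neg (runsOf_ne_nil l hnil)]
      have hA := any_attach (PySem.List.enumerate (pyGroupby l) 0)
        (fun (x : Int × List Char) => if _h : 1 < x.2.length then
          dfsCore (((pyGroupby l).eraseIdx x.1.toNat).flatten) else false)
      have hB := any_attach (PySem.List.enumerate (runsOf l) 0)
        (fun (x : Int × (Char × Nat)) => if _h : 1 < x.2.2 then
          solveP (removeRun (runsOf l) x.1.toNat) else false)
      rw [hA, hB, pyGroupby_eq, enumerate_map, List.any_map]
      apply any_congr_mem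
      intro q hq
      obtain ⟨k, hk, hq⟩ := (PySem.List.mem_enumerate_iff _ _ _).mp hq
      subst hq
      simp only [Function.comp, zero_add, Int.toNat_natCast, decodeRun,
        List.length_replicate]
      by_cases hn : 1 < ((runsOf l)[k]).2
      · rw [dif_pos hn, dif_pos hn]
        rw [← runsOf_erase l k hk]
        have hX : (((runsOf l).map decodeRun).eraseIdx k).flatten
            = decodeRuns ((runsOf l).eraseIdx k) := by
          rw [List.eraseIdx_map]
          rfl
        rw [hX]
        apply ih
        have hkg : k < ((runsOf l).map decodeRun).length := by simpa using hk
        have h1 := flatten_eraseIdx_length ((runsOf l).map decodeRun) k hkg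
        have h2 : ((runsOf l).map decodeRun).flatten.length = l.length := by
          rw [← pyGroupby_eq, pyGroupby_flatten]
        have h3 : 1 < ((runsOf l).map decodeRun)[k].length := by
          simpa [decodeRun] using hn
        rw [← hX]
        omega
      · rw [dif_neg hn, dif_neg hn]

theorem main_equiv (l : List Char) : dfsCore l = solveP (runsOf l) :=
  main_equiv_aux l.length l le_rfl

theorem go_correct_aux : ∀ (W : Nat) (runs : List (Char × Nat))
    (cache : PySem.Dict (List (Char × Nat)) Bool),
    runsWeight runs ≤ W →
    (∀ k b, cache.get? k = some b → b = solveP k) →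
    (solveGo runs cache).1 = solveP runs ∧
      (∀ k b, (solveGo runs cache).2.get? k = some b → b = solveP k) := by
  intro W
  induction W using Nat.strong_induction_on with
  | _ W ihW =>
  intro runs cache hW hOK
  by_cases hnil : runs = []
  · subst hnil
    rw [solveGo]
    refine ⟨?_, hOK⟩
    rw [solveP]
    simp
  · have loop : ∀ (cands : List {p // p ∈ PySem.List.enumerate runs 0})
        (c0 : PySem.Dict (List (Char × Nat)) Bool),
        (∀ k b, c0.get? k = some b → b = solveP k) →
        (solveLoop runs cands c0).1
            = cands.any (fun q =>
                if _h : 1 < q.1.2.2 then solveP (removeRun runs q.1.1.toNat) else false) ∧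
          (∀ k b, (solveLoop runs cands c0).2.get? k = some b → b = solveP k) := by
      intro cands
      induction cands with
      | nil =>
        intro c0 hOK0
        rw [solveLoop]
        exact ⟨rfl, hOK0⟩
      | cons q rest ihq =>
        intro c0 hOK0
        rw [solveLoop]
        by_cases hq : 1 < q.1.2.2
        · rw [dif_pos hq]
          obtain ⟨k, hk, hkq⟩ := (PySem.List.mem_enumerate_iff _ _ _).mp q.2
          have hidx : (q.1.1).toNat = k := by rw [hkq]; simp
          have hlt : runsWeight (removeRun runs q.1.1.toNat) < runsWeight runs := by
            rw [hidx]
            refine removeRun_weight_lt runs k hk ?_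
            have := hq
            rw [hkq] at this
            simpa using this
          have hgo := ihW (runsWeight (removeRun runs q.1.1.toNat)) (by omega)
            (removeRun runs q.1.1.toNat) c0 le_rfl hOK0
          rcases hr : solveGo (removeRun runs q.1.1.toNat) c0 with ⟨b, c1⟩
          rw [hr] at hgo
          rcases b with _ | _
          · dsimp only
            have hrest := ihq c1 hgo.2
            refine ⟨?_, hrest.2⟩
            rw [hrest.1, List.any_cons, dif_pos hq, ← hgo.1]
            simp
          · dsimp only
            refine ⟨?_, hgo.2⟩
            rw [List.any_cons, dif_pos hq, ← hgo.1]
            simp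
        · rw [dif_neg hq]
          have hrest := ihq c0 hOK0
          refine ⟨?_, hrest.2⟩
          rw [hrest.1, List.any_cons, dif_neg hq]
          simp
    rw [solveGo, if_neg hnil]
    rcases hget : cache.get? runs with _ | b
    · rcases hr : solveLoop runs (PySem.List.enumerate runs 0).attach cache with ⟨res, c'⟩
      dsimp only
      have hloop := loop (PySem.List.enumerate runs 0).attach cache hOK
      rw [hr] at hloop
      have hres : res = solveP runs := by
        rw [solveP, if_neg hnil]
        exact hloop.1
      refine ⟨hres, ?_⟩
      intro k b hkb
      rw [PySem.Dict.get?_insert] at hkb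
      by_cases hkr : k = runs
      · rw [if_pos hkr] at hkb
        have hb : res = b := by simpa using hkb
        rw [hkr, ← hb]
        exact hres
      · rw [if_neg hkr] at hkb
        exact hloop.2 k b hkb
    · dsimp only
      exact ⟨hOK runs b hget, hOK⟩

theorem go_correct (runs : List (Char × Nat)) (cache : PySem.Dict (List (Char × Nat)) Bool)
    (hOK : ∀ k b, cache.get? k = some b → b = solveP k) :
    (solveGo runs cache).1 = solveP runs ∧
      (∀ k b, (solveGo runs cache).2.get? k = some b → b = solveP k) :=
  go_correct_aux (runsWeight runs) runs cache le_rfl hOK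

-- ===== VERDICT (by name: the statement is the Claim_ definition above) =====
theorem dfs_spec : Claim_equal_dfs := by
  intro arr _
  unfold Spec_dfs dfs dfs_alt
  rw [main_equiv]
  exact (go_correct (runsOf arr.toList) PySem.Dict.empty
    (by intro k b h; simp [PySem.Dict.get?_empty] at h)).1.symm
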